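-- pv_equiv track=rewrite | github.com/eyereasoner/eye | brains/cases/peasant.py | peasant_trace
-- ===== SOURCE A (Python) =====
-- from typing import List, Tuple
--
-- def peasant_trace(a: int, b: int) -> Tuple[int, List[Tuple[int,int,int,int]]]:
--     """
--     Return product and a trace table for |a|×|b| with rows:
--       (row_idx, a, b, added_flag)  — sign ignored in the table for clarity.
--     """
--     sign = -1 if (a < 0) ^ (b < 0) else 1
--     a, b = abs(a), abs(b)
--     res = 0
--     rows: List[Tuple[int,int,int,int]] = []
--     i = 1
--     while b > 0:
--         add = 1 if (b & 1) else 0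
--         rows.append((i, a, b, add))
--         if add:
--             res += a
--         a <<= 1
--         b >>= 1
--         i += 1
--     return sign * res, rows
-- ===== SOURCE B (Python) =====
-- def peasant_trace(a, b):
--     A, B = abs(a), abs(b)
--     n = B.bit_length()
--     rows = [(i + 1, A << i, B >> i, (B >> i) & 1) for i in range(n)]
--     return a * b, rows
-- ===== Notes on version B (the rewrite author's own statement) =====
-- stated objective: simpler
-- what changed: Replaces the doubling/halving while-loop with running accumulator, mutable trace list and sign fix-up by the closed-form product a*b plus a comprehension deriving each trace row directly from its bit position via bit_length and shifts.
import Mathlib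
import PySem

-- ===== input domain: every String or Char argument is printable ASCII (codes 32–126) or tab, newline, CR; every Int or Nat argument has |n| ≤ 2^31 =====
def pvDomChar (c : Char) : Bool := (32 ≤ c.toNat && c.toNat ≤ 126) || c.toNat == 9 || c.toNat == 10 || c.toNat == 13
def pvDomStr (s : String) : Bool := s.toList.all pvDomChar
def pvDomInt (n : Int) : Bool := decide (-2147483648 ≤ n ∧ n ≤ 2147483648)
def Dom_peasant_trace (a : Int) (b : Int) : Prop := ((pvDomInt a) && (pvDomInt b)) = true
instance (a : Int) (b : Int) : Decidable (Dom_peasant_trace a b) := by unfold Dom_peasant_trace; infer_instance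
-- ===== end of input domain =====

-- ===== PORT A =====
-- Port of A. The while loop is pvLoopA; Python's  b & 1 / a << 1 / b >> 1  are
-- PySem.Int.band b 1 / a <<< 1 / b >>> 1 (exact on all ints).
def pvLoopA (a b i res : Int) (rows : List (Int × Int × Int × Int)) :
    Int × (List (Int × Int × Int × Int)) :=
  if 0 < b then
    -- add = 1 if (b & 1) else 0  (Python truthiness of the int b & 1)
    let add : Int := if PySem.Int.band b 1 ≠ 0 then 1 else 0
    let rows' := rows ++ [(i, a, b, add)]
    let res' := if add ≠ 0 then res + a else res
    pvLoopA (a <<< (1:Nat)) (b >>> (1:Nat)) (i + 1) res' rows'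
  else (res, rows)
termination_by b.toNat
decreasing_by rw [Int.shiftRight_eq_div_pow]; omega

def peasant_trace (a : Int) (b : Int) : Int × (List (Int × Int × Int × Int)) :=
  let sign : Int := if (a < 0) ≠ (b < 0) then -1 else 1
  let p := pvLoopA |a| |b| 1 0 []
  (sign * p.1, p.2)

-- ===== PORT B =====
-- B computes the product directly as a * b and derives each trace row from its
-- bit position (B.bit_length() is PySem.Int.bitLength) instead of maintaining
-- running doubled/halved values in a loop.
def peasant_trace_alt (a : Int) (b : Int) : Int × (List (Int × Int × Int × Int)) :=
  let A : Int := |a|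
  let B : Int := |b|
  let n : Nat := PySem.Int.bitLength B
  (a * b,
    (List.range n).map (fun (i : Nat) =>
      ((i : Int) + 1, A <<< i, B >>> i, PySem.Int.band (B >>> i) 1)))

-- ===== PRECONDITION & SPEC =====
def Spec_peasant_trace (a : Int) (b : Int) (out : Int × (List (Int × Int × Int × Int))) : Prop := out = peasant_trace_alt a b
instance (a : Int) (b : Int) (out : Int × (List (Int × Int × Int × Int))) : Decidable (Spec_peasant_trace a b out) := by unfold Spec_peasant_trace; infer_instance

-- ===== CLAIM (what is proved, stated in full; the proofs are below) =====
def Claim_equal_peasant_trace : Prop := ∀ (a : Int) (b : Int), Dom_peasant_trace a b → Spec_peasant_trace a b (peasant_trace a b)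

-- ===== LEMMAS AND PROOFS =====

lemma pvShiftRight_one (b : Int) (_hb : 0 < b) : b >>> (1:Nat) = PySem.Int.floordiv b 2 := by
  rw [Int.shiftRight_eq_div_pow, PySem.Int.floordiv_eq_ediv_of_pos (show (0:Int) < 2 by omega)]
  norm_num

lemma pvShiftRight_shiftRight (b : Int) (j : Nat) : (b >>> (1:Nat)) >>> j = b >>> (j+1) := by
  simp only [Int.shiftRight_eq_div_pow]; push_cast
  rw [Int.ediv_ediv_of_nonneg (by positivity)]; ring_nf

lemma pvShiftLeft_shiftLeft (a : Int) (j : Nat) : (a <<< (1:Nat)) <<< j = a <<< (j+1) := by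
  simp only [Int.shiftLeft_eq]; ring

-- the loop of A, characterised in closed form: it adds a*b to the accumulator and
-- appends one row per bit of b
lemma pvLoopA_eq (n : Nat) : ∀ (b : Int), b.toNat ≤ n → 0 ≤ b → ∀ (a i res : Int) (rows : List (Int × Int × Int × Int)),
    pvLoopA a b i res rows =
      (res + a * b,
       rows ++ (List.range (PySem.Int.bitLength b)).map (fun (j : Nat) =>
         (i + (j : Int), a <<< j, b >>> j, PySem.Int.band (b >>> j) 1))) := by
  induction n with
  | zero =>
    intro b hbn hb a i res rows
    have hb0 : b = 0 := by omega
    subst hb0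
    rw [pvLoopA]
    simp [PySem.Int.bitLength_zero]
  | succ n ih =>
    intro b hbn hb a i res rows
    rw [pvLoopA]
    by_cases hpos : 0 < b
    · simp only [if_pos hpos]
      have hfd : b >>> (1:Nat) = PySem.Int.floordiv b 2 := pvShiftRight_one b hpos
      have hdiv : b >>> (1:Nat) = b / 2 := by
        rw [Int.shiftRight_eq_div_pow]; norm_num
      have hrec := ih (b >>> (1:Nat)) (by rw [hdiv]; omega) (by rw [hdiv]; omega)
        (a <<< (1:Nat)) (i + 1)
        (if (if PySem.Int.band b 1 ≠ 0 then (1:Int) else 0) ≠ 0 then res + a else res)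
        (rows ++ [(i, a, b, if PySem.Int.band b 1 ≠ 0 then (1:Int) else 0)])
      rw [hrec]
      have hbl : PySem.Int.bitLength b = PySem.Int.bitLength (b >>> (1:Nat)) + 1 := by
        rw [hfd]; exact PySem.Int.bitLength_of_pos hpos
      have hband : PySem.Int.band b 1 = b % 2 := by
        rw [PySem.Int.band_one, PySem.Int.mod_eq_emod_of_pos (by omega)]
      have h2 : b = 2 * (b / 2) + b % 2 := by omega
      simp only [Prod.mk.injEq]
      constructor
      · -- accumulator: res' + (a<<<1) * (b>>>1) = res + a * b
        have key : a * 2 * (b / 2) + a * (b % 2) = a * b := by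
          linear_combination a * (Int.mul_ediv_add_emod b 2)
        simp only [hband, hdiv, Int.shiftLeft_eq, pow_one]
        rcases Int.emod_two_eq b with h | h <;> rw [h] at key <;> simp [h] at key ⊢ <;> linarith [key]
      · -- rows
        rw [hbl, List.range_succ_eq_map, List.map_cons, List.map_map]
        simp only [List.append_assoc, List.singleton_append]
        have hadd : (if PySem.Int.band b 1 ≠ 0 then (1:Int) else 0) = PySem.Int.band b 1 := by
          rw [hband]; rcases Int.emod_two_eq b with h | h <;> simp [h]
        congr 1
        congr 1
        · -- head row is the current (i, a, b, add)
          simp [hadd, Int.shiftLeft_eq, Int.shiftRight_eq_div_pow]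
        · -- later rows: one doubling/halving step = one more bit position
          apply List.map_congr_left
          intro j _
          simp only [Function.comp_apply, Nat.succ_eq_add_one,
            pvShiftLeft_shiftLeft, pvShiftRight_shiftRight, Prod.mk.injEq,
            Nat.cast_add, Nat.cast_one]
          constructor
          · ring
          · trivial
    · simp only [if_neg hpos]
      have hb0 : b = 0 := by omega
      subst hb0
      simp [PySem.Int.bitLength_zero]

-- the sign prefactor applied to |a|*|b| is just a*b
lemma pvSign_mul (a b : Int) : (if (a < 0) ≠ (b < 0) then (-1:Int) else 1) * (|a| * |b|) = a * b := by
  by_cases ha : a < 0 <;> by_cases hb : b < 0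
  · rw [if_neg (by simp [ha, hb]), abs_of_neg ha, abs_of_neg hb]; ring
  · rw [if_pos (by simp [ha, hb]), abs_of_neg ha, abs_of_nonneg (not_lt.mp hb)]; ring
  · rw [if_pos (by simp [ha, hb]), abs_of_nonneg (not_lt.mp ha), abs_of_neg hb]; ring
  · rw [if_neg (by simp [ha, hb]), abs_of_nonneg (not_lt.mp ha), abs_of_nonneg (not_lt.mp hb)]; ring

-- ===== VERDICT (by name: the statement is the Claim_ definition above) =====
theorem peasant_trace_spec : Claim_equal_peasant_trace := by
  intro a b _
  unfold Spec_peasant_trace peasant_trace peasant_trace_alt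
  rw [pvLoopA_eq (|b|).toNat |b| le_rfl (abs_nonneg b)]
  simp only [zero_add, List.nil_append]
  simp only [Prod.mk.injEq]
  constructor
  · exact pvSign_mul a b
  · apply List.map_congr_left
    intro j _
    simp [add_comm (1:Int)]
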